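-- pv_equiv track=rewrite | github.com/cww324/regimefinder | scripts/dashboard.py | max_loss_streak
-- ===== SOURCE A (Python) =====
-- def max_loss_streak(pnls):
--     streak = 0
--     max_streak = 0
--     for pnl in pnls:
--         if pnl <= 0:
--             streak += 1
--             max_streak = max(max_streak, streak)
--         else:
--             streak = 0
--     return max_streak
-- ===== SOURCE B (Python) =====
-- def max_loss_streak(pnls):
--     best = 0
--     i = 0
--     n = len(pnls)
--     while i < n:
--         if pnls[i] <= 0:
--             j = i + 1
--             while j < n and pnls[j] <= 0:
--                 j += 1
--             best = max(best, j - i)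
--             i = j
--         else:
--             i += 1
--     return best
-- ===== Notes on version B (the rewrite author's own statement) =====
-- stated objective: alternative
-- what changed: B partitions the sequence into maximal non-positive runs (an outer scan that, on hitting a loss, consumes the whole run at once and measures its length) instead of maintaining a running streak counter updated element by element.
import Mathlib
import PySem

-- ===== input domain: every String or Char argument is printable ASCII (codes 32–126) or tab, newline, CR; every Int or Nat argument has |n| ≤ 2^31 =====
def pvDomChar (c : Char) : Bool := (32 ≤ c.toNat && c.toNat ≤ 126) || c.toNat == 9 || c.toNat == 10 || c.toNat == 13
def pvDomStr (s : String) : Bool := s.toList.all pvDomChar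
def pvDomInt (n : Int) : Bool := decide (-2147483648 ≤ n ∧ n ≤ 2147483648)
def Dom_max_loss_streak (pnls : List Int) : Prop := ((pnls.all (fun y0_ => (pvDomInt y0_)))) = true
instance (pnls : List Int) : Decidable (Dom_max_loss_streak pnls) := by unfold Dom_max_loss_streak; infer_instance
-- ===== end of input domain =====

-- B scans runs of non-positive PnLs and measures each run at once, instead of A's per-element streak counter; alternative decomposition, same O(n) cost.

-- ===== PORT A =====
-- A's for-loop over (streak, max_streak), as structural recursion over the same state
def pvLoopA : List Int → Int → Int → Int
  | [], _, max_streak => max_streak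
  | pnl :: rest, streak, max_streak =>
      if pnl ≤ 0 then pvLoopA rest (streak + 1) (max max_streak (streak + 1))
      else pvLoopA rest 0 max_streak

def max_loss_streak (pnls : List Int) : Int := pvLoopA pnls 0 0

-- ===== PORT B =====
-- B's outer while-loop: on a non-positive element, the inner while-loop consumes
-- the rest of the run (takeWhile/dropWhile) and the run length updates best
def pvGoB : List Int → Int → Int
  | [], best => best
  | p :: rest, best =>
      if p ≤ 0 then
        let run := rest.takeWhile (fun q => decide (q ≤ 0))
        let rest' := rest.dropWhile (fun q => decide (q ≤ 0))
        pvGoB rest' (max best (1 + (run.length : Int)))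
      else pvGoB rest best
termination_by l _ => l.length
decreasing_by
  · have := List.length_dropWhile_le (fun q => decide (q ≤ 0)) rest
    simp; omega
  · simp

def max_loss_streak_alt (pnls : List Int) : Int := pvGoB pnls 0

-- ===== PRECONDITION & SPEC =====
def Spec_max_loss_streak (pnls : List Int) (out : Int) : Prop := out = max_loss_streak_alt pnls
instance (pnls : List Int) (out : Int) : Decidable (Spec_max_loss_streak pnls out) := by unfold Spec_max_loss_streak; infer_instance

-- ===== CLAIM (what is proved, stated in full; the proofs are below) =====
def Claim_equal_max_loss_streak : Prop := ∀ (pnls : List Int), Dom_max_loss_streak pnls → Spec_max_loss_streak pnls (max_loss_streak pnls)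

-- ===== LEMMAS AND PROOFS =====

-- the first element remaining after dropWhile falsifies the predicate
theorem pvDropWhile_head_false {α : Type} (p : α → Bool) :
    ∀ (l : List α) (q : α) (t : List α), l.dropWhile p = q :: t → p q = false := by
  intro l
  induction l with
  | nil => intro q t h; simp [List.dropWhile] at h
  | cons x xs ih =>
      intro q t h
      by_cases hx : p x
      · simp only [List.dropWhile, hx] at h
        exact ih q t h
      · have hcons : x :: xs = q :: t := by simpa [List.dropWhile, hx] using h
        injection hcons with hq ht
        subst hq
        simpa using hx

-- running A's loop through a block of non-positive elements adds its length to the streak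
theorem pvLoopA_nonpos_run (run : List Int) :
    ∀ (rest : List Int) (s m : Int), (∀ x ∈ run, x ≤ 0) → s ≤ m →
      pvLoopA (run ++ rest) s m = pvLoopA rest (s + run.length) (max m (s + run.length)) := by
  induction run with
  | nil =>
      intro rest s m _ hsm
      simp [max_eq_left hsm]
  | cons x xs ih =>
      intro rest s m hall hsm
      have hx : x ≤ 0 := hall x (by simp)
      have hxs : ∀ y ∈ xs, y ≤ 0 := fun y hy => hall y (by simp [hy])
      simp only [List.cons_append, pvLoopA, if_pos hx]
      rw [ih rest (s + 1) (max m (s + 1)) hxs (le_max_right _ _)]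
      congr 1
      · simp only [List.length_cons]; push_cast; omega
      · simp only [List.length_cons]; push_cast; omega

-- the streak value is irrelevant when the next element is positive
theorem pvLoopA_pos_head (q : Int) (t : List Int) (s m : Int) (hq : 0 < q) :
    pvLoopA (q :: t) s m = pvLoopA (q :: t) 0 m := by
  have : ¬ q ≤ 0 := by omega
  simp [pvLoopA, this]

theorem pvLoop_eq_go : ∀ (n : ℕ) (pnls : List Int), pnls.length ≤ n →
    ∀ m : Int, 0 ≤ m → pvLoopA pnls 0 m = pvGoB pnls m := by
  intro n
  induction n with
  | zero =>
      intro pnls hlen m _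
      have : pnls = [] := List.eq_nil_of_length_eq_zero (Nat.le_zero.mp hlen)
      subst this; simp [pvLoopA, pvGoB]
  | succ k ih =>
      intro pnls hlen m hm
      match pnls with
      | [] => simp [pvLoopA, pvGoB]
      | p :: rest =>
        by_cases hp : p ≤ 0
        · -- first run: p followed by takeWhile of rest
          set pr : Int → Bool := fun q => decide (q ≤ 0) with hpr
          have hsplit : rest.takeWhile pr ++ rest.dropWhile pr = rest :=
            List.takeWhile_append_dropWhile
          have hall : ∀ x ∈ rest.takeWhile pr, x ≤ 0 := by
            intro x hx
            have := List.mem_takeWhile_imp hx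
            simpa [hpr] using this
          have hLen : (rest.takeWhile pr ++ rest.dropWhile pr).length = rest.length := by
            rw [hsplit]
          have step1 : pvLoopA (p :: rest) 0 m
              = pvLoopA (rest.dropWhile pr) (1 + (rest.takeWhile pr).length)
                  (max m (1 + (rest.takeWhile pr).length)) := by
            conv_lhs => rw [← hsplit]
            simp only [pvLoopA, if_pos hp, zero_add]
            rw [pvLoopA_nonpos_run (rest.takeWhile pr) (rest.dropWhile pr)
                1 (max m 1) hall (le_max_right _ _)]
            congr 1
            omega
          -- drop the streak: dropWhile's head (if any) is positive
          have step2 : pvLoopA (rest.dropWhile pr) (1 + (rest.takeWhile pr).length)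
                  (max m (1 + (rest.takeWhile pr).length))
              = pvLoopA (rest.dropWhile pr) 0 (max m (1 + (rest.takeWhile pr).length)) := by
            match hdw : rest.dropWhile pr with
            | [] => simp [pvLoopA]
            | q :: t =>
              have hq : pr q = false := pvDropWhile_head_false pr rest q t hdw
              have : 0 < q := by simpa [hpr, not_le] using hq
              exact pvLoopA_pos_head q t _ _ this
          have hrec : (rest.dropWhile pr).length ≤ k := by
            have h1 := List.length_dropWhile_le pr rest
            have h2 : rest.length ≤ k := by simpa using Nat.lt_succ_iff.mp (Nat.lt_of_lt_of_le (by simp) hlen)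
            omega
          rw [step1, step2, ih _ hrec _ (le_trans hm (le_max_left _ _))]
          simp only [pvGoB, if_pos hp]
          rfl
        · -- positive head: both skip it
          simp only [pvLoopA, pvGoB, if_neg hp]
          exact ih rest (by simpa using Nat.lt_succ_iff.mp (Nat.lt_of_lt_of_le (by simp) hlen)) m hm

-- ===== VERDICT (by name: the statement is the Claim_ definition above) =====
theorem max_loss_streak_spec : Claim_equal_max_loss_streak := by
  intro pnls _
  unfold Spec_max_loss_streak max_loss_streak max_loss_streak_alt
  exact pvLoop_eq_go pnls.length pnls le_rfl 0 le_rfl
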